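-- pv_equiv track=rewrite | github.com/ALLAN-DIP/diplomacy_cicero | fairdiplomacy_external/mila_api.py | psudo_code_gene
-- ===== SOURCE A (Python) =====
-- def psudo_code_gene(current_phase_code,message,power_dict,af_dict):
--     string1 = 'FCT (ORR'
--     string2 = 'PRP (ORR'
--     has_FCT_order = False
--     has_PRP_order = False
--     for country in current_phase_code.keys():
--         if country == message["sender"]:
--         #FCT for sender
--             for i in current_phase_code[country]:
--                 sen_length = len(i)
--                 if sen_length == 11:
--                     string1 += ' (XDO (('+power_dict[country]+' '+af_dict[i[0]]+' '+i[2:5]+') MTO '+i[8:11]+'))'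
--                     has_FCT_order = True
--                 elif sen_length == 7:
--                     if i[6] == 'H':
--                         string1 += ' (XDO (('+power_dict[country]+' '+af_dict[i[0]]+' '+i[2:5]+') HLD))'
--                         has_FCT_order = True
--                     elif i[6] == 'B':
--                         string1 += ' (XDO (('+power_dict[country]+' '+af_dict[i[0]]+' '+i[2:5]+') BLD))'
--                         has_FCT_order = True
--                     elif i[6] == 'R':
--                         string1 += ' (XDO (('+power_dict[country]+' '+af_dict[i[0]]+' '+i[2:5]+') REM))'
--                         has_FCT_order = True
--                 elif sen_length == 19:
--                     if i[6] =='S':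
--                         string1 += ' (XDO (('+power_dict[country]+' '+af_dict[i[0]]+' '+i[2:5]+') SUP ('+power_dict[country]+' '+af_dict[i[8]]+' '+i[10:13]+') MTO '+i[16:19]+'))'
--                         has_FCT_order = True
--                     elif i[6] == 'C':
--                         string1 += ' (XDO (('+power_dict[country]+' '+af_dict[i[0]]+' '+i[2:5]+') CVY ('+power_dict[country]+' '+af_dict[i[8]]+' '+i[10:13]+') CTO '+i[16:19]+'))'
--                         string1 += ' (XDO (('+power_dict[country]+' '+af_dict[i[8]]+' '+i[10:13]+') CTO '+i[16:19]+' VIA ('+i[2:5]+')))'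
--                         has_FCT_order = True
--         else:
--         #PRP for recipient
--             for i in current_phase_code[country]:
--                 sen_length = len(i)
--                 if sen_length == 11:
--                     string2 += ' (XDO (('+power_dict[country]+' '+af_dict[i[0]]+' '+i[2:5]+') MTO '+i[8:11]+'))'
--                     has_PRP_order = True
--                 elif sen_length == 7:
--                     if i[6] == 'H':
--                         string2 += ' (XDO (('+power_dict[country]+' '+af_dict[i[0]]+' '+i[2:5]+') HLD))'
--                         has_PRP_order = True
--                     elif i[6] == 'B':
--                         string2 += ' (XDO (('+power_dict[country]+' '+af_dict[i[0]]+' '+i[2:5]+') BLD))'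
--                         has_PRP_order = True
--                     elif i[6] == 'R':
--                         string2 += ' (XDO (('+power_dict[country]+' '+af_dict[i[0]]+' '+i[2:5]+') REM))'
--                         has_PRP_order = True
--                 elif sen_length == 19:
--                     if i[6] =='S':
--                         string2 += ' (XDO (('+power_dict[country]+' '+af_dict[i[0]]+' '+i[2:5]+') SUP ('+power_dict[country]+' '+af_dict[i[8]]+' '+i[10:13]+') MTO '+i[16:19]+'))'
--                         has_PRP_order = True
--                     elif i[6] == 'C':
--                         string2 += ' (XDO (('+power_dict[country]+' '+af_dict[i[0]]+' '+i[2:5]+') CVY ('+power_dict[country]+' '+af_dict[i[8]]+' '+i[10:13]+') CTO '+i[16:19]+'))'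
--                         string2 += ' (XDO (('+power_dict[country]+' '+af_dict[i[8]]+' '+i[10:13]+') CTO '+i[16:19]+' VIA ('+i[2:5]+')))'
--                         has_PRP_order = True
--     string1 += ')'
--     string2 += ')'
--     if not has_FCT_order:
--         string1 = None
--     if not has_PRP_order:
--         string2 = None
--     return string1,string2
-- ===== SOURCE B (Python) =====
-- # Table-driven, staged-pass rewrite: partition orders into flat (country, order)
-- # pair lists by sender, then render each pair through a (length, tag)-keyed
-- # template table with str.format; emptiness of the fragment lists replaces flags.
-- TEMPLATES = {
--     11: {'': [' (XDO (({p} {a0} {s25}) MTO {s811}))']},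
--     7: {'H': [' (XDO (({p} {a0} {s25}) HLD))'],
--         'B': [' (XDO (({p} {a0} {s25}) BLD))'],
--         'R': [' (XDO (({p} {a0} {s25}) REM))']},
--     19: {'S': [' (XDO (({p} {a0} {s25}) SUP ({p} {a8} {s1013}) MTO {s1619}))'],
--          'C': [' (XDO (({p} {a0} {s25}) CVY ({p} {a8} {s1013}) CTO {s1619}))',
--                ' (XDO (({p} {a8} {s1013}) CTO {s1619} VIA ({s25})))']},
-- }
--
--
-- def psudo_code_gene(current_phase_code, message, power_dict, af_dict):
--     sender = message.get("sender")
--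
--     def render_all(pairs):
--         out = []
--         for c, i in pairs:
--             n = len(i)
--             tmpls = TEMPLATES.get(n, {}).get(i[6] if n in (7, 19) else '')
--             if tmpls is None:
--                 continue
--             fields = {'p': power_dict[c], 'a0': af_dict[i[0]], 's25': i[2:5],
--                       's811': i[8:11], 's1013': i[10:13], 's1619': i[16:19],
--                       'a8': af_dict[i[8]] if n == 19 else ''}
--             out += [t.format(**fields) for t in tmpls]
--         return out
--
--     fct = render_all([(c, o) for c, orders in current_phase_code.items()
--                       if c == sender for o in orders])
--     prp = render_all([(c, o) for c, orders in current_phase_code.items()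
--                       if c != sender for o in orders])
--     return ('FCT (ORR' + ''.join(fct) + ')' if fct else None,
--             'PRP (ORR' + ''.join(prp) + ')' if prp else None)
-- ===== Notes on version B (the rewrite author's own statement) =====
-- stated objective: alternative
-- what changed: Replaces A's single pass with two flag-carrying string accumulators and duplicated if/elif chains by staged passes: two comprehensions first partition the orders into flat (country,order) pair lists by sender, then one table-driven renderer maps each pair through a (length,tag)-keyed template dict filled by str.format, and the joined fragment lists decide emptiness instead of flags.
import Mathlib
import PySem

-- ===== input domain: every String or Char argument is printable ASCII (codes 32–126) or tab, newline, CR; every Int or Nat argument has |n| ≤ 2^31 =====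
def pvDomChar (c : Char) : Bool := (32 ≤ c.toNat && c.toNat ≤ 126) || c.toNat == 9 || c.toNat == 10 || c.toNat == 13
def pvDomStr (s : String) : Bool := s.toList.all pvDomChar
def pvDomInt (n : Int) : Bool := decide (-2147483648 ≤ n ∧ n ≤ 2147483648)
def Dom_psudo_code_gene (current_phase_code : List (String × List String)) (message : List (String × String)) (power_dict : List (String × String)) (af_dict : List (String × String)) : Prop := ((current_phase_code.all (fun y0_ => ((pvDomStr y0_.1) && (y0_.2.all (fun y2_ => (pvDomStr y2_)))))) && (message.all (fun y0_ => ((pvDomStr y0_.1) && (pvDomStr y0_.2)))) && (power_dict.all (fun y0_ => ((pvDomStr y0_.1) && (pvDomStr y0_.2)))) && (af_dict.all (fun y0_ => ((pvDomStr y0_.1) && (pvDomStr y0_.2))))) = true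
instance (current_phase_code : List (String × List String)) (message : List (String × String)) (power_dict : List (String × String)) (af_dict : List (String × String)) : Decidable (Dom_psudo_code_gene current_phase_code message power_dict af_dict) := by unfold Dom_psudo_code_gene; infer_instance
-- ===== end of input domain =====

-- B replaces A's single flag-carrying pass with duplicated if/elif chains by staged passes: two
-- comprehensions partition the orders into flat (country, order) pair lists by sender, and one
-- table-driven renderer fills (length, tag)-keyed templates; list emptiness replaces the flags.


-- shared primitives: Python's d[k] (total form, exact under Pre_) and the 1-character string i[n]
def pvGetStr (d : List (String × String)) (k : String) : String :=
  ((PySem.Dict.mk d).get? k).getD ""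
def pvCharStr (i : String) (n : Int) : String :=
  match PySem.Str.pyGet? i n with
  | some c => String.ofList [c]
  | none => ""

-- ===== PORT A =====
-- A's duplicated per-order if/elif block (identical for the FCT and the PRP loop), acting on (string, flag)
def pvStepA (power_dict af_dict : List (String × String)) (country i : String) (sb : String × Bool) : String × Bool :=
  let sen_length := PySem.Str.len i
  if sen_length = 11 then
    (sb.1 ++ " (XDO ((" ++ pvGetStr power_dict country ++ " " ++ pvGetStr af_dict (pvCharStr i 0) ++ " " ++ PySem.Str.slice i (some 2) (some 5) ++ ") MTO " ++ PySem.Str.slice i (some 8) (some 11) ++ "))", true)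
  else if sen_length = 7 then
    if PySem.Str.pyGet? i 6 = some 'H' then
      (sb.1 ++ " (XDO ((" ++ pvGetStr power_dict country ++ " " ++ pvGetStr af_dict (pvCharStr i 0) ++ " " ++ PySem.Str.slice i (some 2) (some 5) ++ ") HLD))", true)
    else if PySem.Str.pyGet? i 6 = some 'B' then
      (sb.1 ++ " (XDO ((" ++ pvGetStr power_dict country ++ " " ++ pvGetStr af_dict (pvCharStr i 0) ++ " " ++ PySem.Str.slice i (some 2) (some 5) ++ ") BLD))", true)
    else if PySem.Str.pyGet? i 6 = some 'R' then
      (sb.1 ++ " (XDO ((" ++ pvGetStr power_dict country ++ " " ++ pvGetStr af_dict (pvCharStr i 0) ++ " " ++ PySem.Str.slice i (some 2) (some 5) ++ ") REM))", true)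
    else sb
  else if sen_length = 19 then
    if PySem.Str.pyGet? i 6 = some 'S' then
      (sb.1 ++ " (XDO ((" ++ pvGetStr power_dict country ++ " " ++ pvGetStr af_dict (pvCharStr i 0) ++ " " ++ PySem.Str.slice i (some 2) (some 5) ++ ") SUP (" ++ pvGetStr power_dict country ++ " " ++ pvGetStr af_dict (pvCharStr i 8) ++ " " ++ PySem.Str.slice i (some 10) (some 13) ++ ") MTO " ++ PySem.Str.slice i (some 16) (some 19) ++ "))", true)
    else if PySem.Str.pyGet? i 6 = some 'C' then
      (sb.1 ++ " (XDO ((" ++ pvGetStr power_dict country ++ " " ++ pvGetStr af_dict (pvCharStr i 0) ++ " " ++ PySem.Str.slice i (some 2) (some 5) ++ ") CVY (" ++ pvGetStr power_dict country ++ " " ++ pvGetStr af_dict (pvCharStr i 8) ++ " " ++ PySem.Str.slice i (some 10) (some 13) ++ ") CTO " ++ PySem.Str.slice i (some 16) (some 19) ++ "))"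
        ++ " (XDO ((" ++ pvGetStr power_dict country ++ " " ++ pvGetStr af_dict (pvCharStr i 8) ++ " " ++ PySem.Str.slice i (some 10) (some 13) ++ ") CTO " ++ PySem.Str.slice i (some 16) (some 19) ++ " VIA (" ++ PySem.Str.slice i (some 2) (some 5) ++ ")))", true)
    else sb
  else sb

def psudo_code_gene (current_phase_code : List (String × List String)) (message : List (String × String)) (power_dict : List (String × String)) (af_dict : List (String × String)) : Option String × Option String :=
  let sender := ((PySem.Dict.mk message).get? "sender").getD ""
  let st := current_phase_code.foldl
    (fun (st : (String × Bool) × (String × Bool)) kv =>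
      let orders := ((PySem.Dict.mk current_phase_code).get? kv.1).getD []
      if kv.1 = sender then
        (orders.foldl (fun sb i => pvStepA power_dict af_dict kv.1 i sb) st.1, st.2)
      else
        (st.1, orders.foldl (fun sb i => pvStepA power_dict af_dict kv.1 i sb) st.2))
    (("FCT (ORR", false), ("PRP (ORR", false))
  let string1 := st.1.1 ++ ")"
  let string2 := st.2.1 ++ ")"
  ((if st.1.2 then some string1 else none), (if st.2.2 then some string2 else none))

-- ===== PORT B =====
-- a template token: literal text or a {name} field of Source B's format templates
inductive PvTok where
  | lit : String → PvTok
  | fld : String → PvTok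
deriving DecidableEq, Repr

-- hand-port of t.format(**fields): exact here, since every template is literal text plus {name}
-- fields (no other format syntax) and every name a template references is a key of `fields`
def pvRender (fields : PySem.Dict String String) (toks : List PvTok) : String :=
  PySem.Str.join "" (toks.map fun t => match t with
    | PvTok.lit s => s
    | PvTok.fld k => (fields.get? k).getD "")

-- Source B's TEMPLATES table, each template tokenised
def pvTemplates : PySem.Dict Int (PySem.Dict String (List (List PvTok))) := PySem.Dict.mk
  [(11, PySem.Dict.mk [("", [[PvTok.lit " (XDO ((", PvTok.fld "p", PvTok.lit " ", PvTok.fld "a0", PvTok.lit " ", PvTok.fld "s25", PvTok.lit ") MTO ", PvTok.fld "s811", PvTok.lit "))"]])]),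
   (7, PySem.Dict.mk [("H", [[PvTok.lit " (XDO ((", PvTok.fld "p", PvTok.lit " ", PvTok.fld "a0", PvTok.lit " ", PvTok.fld "s25", PvTok.lit ") HLD))"]]),
                      ("B", [[PvTok.lit " (XDO ((", PvTok.fld "p", PvTok.lit " ", PvTok.fld "a0", PvTok.lit " ", PvTok.fld "s25", PvTok.lit ") BLD))"]]),
                      ("R", [[PvTok.lit " (XDO ((", PvTok.fld "p", PvTok.lit " ", PvTok.fld "a0", PvTok.lit " ", PvTok.fld "s25", PvTok.lit ") REM))"]])]),
   (19, PySem.Dict.mk [("S", [[PvTok.lit " (XDO ((", PvTok.fld "p", PvTok.lit " ", PvTok.fld "a0", PvTok.lit " ", PvTok.fld "s25", PvTok.lit ") SUP (", PvTok.fld "p", PvTok.lit " ", PvTok.fld "a8", PvTok.lit " ", PvTok.fld "s1013", PvTok.lit ") MTO ", PvTok.fld "s1619", PvTok.lit "))"]]),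
                       ("C", [[PvTok.lit " (XDO ((", PvTok.fld "p", PvTok.lit " ", PvTok.fld "a0", PvTok.lit " ", PvTok.fld "s25", PvTok.lit ") CVY (", PvTok.fld "p", PvTok.lit " ", PvTok.fld "a8", PvTok.lit " ", PvTok.fld "s1013", PvTok.lit ") CTO ", PvTok.fld "s1619", PvTok.lit "))"],
                              [PvTok.lit " (XDO ((", PvTok.fld "p", PvTok.lit " ", PvTok.fld "a8", PvTok.lit " ", PvTok.fld "s1013", PvTok.lit ") CTO ", PvTok.fld "s1619", PvTok.lit " VIA (", PvTok.fld "s25", PvTok.lit ")))"]])])]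

-- the `fields` dict Source B builds for one (country, order) pair
def pvFields (power_dict af_dict : List (String × String)) (c i : String) : PySem.Dict String String :=
  PySem.Dict.mk
    [("p", pvGetStr power_dict c), ("a0", pvGetStr af_dict (pvCharStr i 0)),
     ("s25", PySem.Str.slice i (some 2) (some 5)), ("s811", PySem.Str.slice i (some 8) (some 11)),
     ("s1013", PySem.Str.slice i (some 10) (some 13)), ("s1619", PySem.Str.slice i (some 16) (some 19)),
     ("a8", if PySem.Str.len i = 19 then pvGetStr af_dict (pvCharStr i 8) else "")]

-- Source B's render_all loop over a flat (country, order) pair list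
def pvRenderAll (power_dict af_dict : List (String × String)) (pairs : List (String × String)) : List String :=
  pairs.foldl
    (fun out ci =>
      let n := PySem.Str.len ci.2
      match ((pvTemplates.get? n).getD (PySem.Dict.mk [])).get?
              (if n = 7 ∨ n = 19 then pvCharStr ci.2 6 else "") with
      | none => out
      | some tmpls => out ++ tmpls.map (pvRender (pvFields power_dict af_dict ci.1 ci.2)))
    []

def psudo_code_gene_alt (current_phase_code : List (String × List String)) (message : List (String × String)) (power_dict : List (String × String)) (af_dict : List (String × String)) : Option String × Option String :=
  let sender := (PySem.Dict.mk message).get? "sender"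
  let fct := pvRenderAll power_dict af_dict
    ((PySem.Dict.mk current_phase_code).items.flatMap fun kv =>
      if some kv.1 = sender then kv.2.map (fun o => (kv.1, o)) else [])
  let prp := pvRenderAll power_dict af_dict
    ((PySem.Dict.mk current_phase_code).items.flatMap fun kv =>
      if some kv.1 = sender then [] else kv.2.map (fun o => (kv.1, o)))
  ((if fct.isEmpty then none else some ("FCT (ORR" ++ PySem.Str.join "" fct ++ ")")),
   (if prp.isEmpty then none else some ("PRP (ORR" ++ PySem.Str.join "" prp ++ ")")))

-- ===== PRECONDITION & SPEC =====
-- true iff the order matches one of A's recognised (length, 7th-char) signatures, i.e. A performs dict lookups on it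
def pvNeedsFmt (i : String) : Bool :=
  PySem.Str.len i == 11 ||
  (PySem.Str.len i == 7 && (PySem.Str.pyGet? i 6 == some 'H' || PySem.Str.pyGet? i 6 == some 'B' || PySem.Str.pyGet? i 6 == some 'R')) ||
  (PySem.Str.len i == 19 && (PySem.Str.pyGet? i 6 == some 'S' || PySem.Str.pyGet? i 6 == some 'C'))

-- Pre_: exactly where Python A returns: message has a "sender" key when the loop runs at all and every recognised order finds its
-- country in power_dict and its unit letter(s) in af_dict (otherwise A raises KeyError); the Nodup-keys
-- conjunct only rules out duplicate-key association lists, which cannot arise from a Python dict.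
def Pre_psudo_code_gene (current_phase_code : List (String × List String)) (message : List (String × String)) (power_dict : List (String × String)) (af_dict : List (String × String)) : Prop :=
  (current_phase_code = [] ∨ ((PySem.Dict.mk message).get? "sender").isSome = true) ∧
  (current_phase_code.map Prod.fst).Nodup ∧
  ∀ kv ∈ current_phase_code, ∀ i ∈ kv.2, pvNeedsFmt i = true →
    ((PySem.Dict.mk power_dict).get? kv.1).isSome = true ∧
    ((PySem.Dict.mk af_dict).get? (pvCharStr i 0)).isSome = true ∧
    (PySem.Str.len i = 19 → ((PySem.Dict.mk af_dict).get? (pvCharStr i 8)).isSome = true)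
instance (current_phase_code : List (String × List String)) (message : List (String × String)) (power_dict : List (String × String)) (af_dict : List (String × String)) : Decidable (Pre_psudo_code_gene current_phase_code message power_dict af_dict) := by unfold Pre_psudo_code_gene; infer_instance

def pvWitness_psudo_code_gene : (List (String × List String)) × (List (String × String)) × (List (String × String)) × (List (String × String)) :=
  ([("ENG", ["F LON H"])], [("sender", "ENG")], [("ENG", "ENG")], [("F", "FLT")])

def Spec_psudo_code_gene (current_phase_code : List (String × List String)) (message : List (String × String)) (power_dict : List (String × String)) (af_dict : List (String × String)) (out : Option String × Option String) : Prop := out = psudo_code_gene_alt current_phase_code message power_dict af_dict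
instance (current_phase_code : List (String × List String)) (message : List (String × String)) (power_dict : List (String × String)) (af_dict : List (String × String)) (out : Option String × Option String) : Decidable (Spec_psudo_code_gene current_phase_code message power_dict af_dict out) := by unfold Spec_psudo_code_gene; infer_instance

-- ===== CLAIM (what is proved, stated in full; the proofs are below) =====
def Claim_equal_psudo_code_gene : Prop := ∀ (current_phase_code : List (String × List String)) (message : List (String × String)) (power_dict : List (String × String)) (af_dict : List (String × String)), Dom_psudo_code_gene current_phase_code message power_dict af_dict → Pre_psudo_code_gene current_phase_code message power_dict af_dict → Spec_psudo_code_gene current_phase_code message power_dict af_dict (psudo_code_gene current_phase_code message power_dict af_dict)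

-- ===== LEMMAS AND PROOFS =====

-- the fragment list one (country, order) pair contributes in B (lookup + render, [] when no template matches)
def pvFragsP (power_dict af_dict : List (String × String)) (c i : String) : List String :=
  let n := PySem.Str.len i
  match ((pvTemplates.get? n).getD (PySem.Dict.mk [])).get?
          (if n = 7 ∨ n = 19 then pvCharStr i 6 else "") with
  | none => []
  | some tmpls => tmpls.map (pvRender (pvFields power_dict af_dict c i))

-- ''.join on List Char lists: intercalating the empty separator is flattening
theorem pvInterNil {α : Type} : ∀ (l : List (List α)), ([] : List α).intercalate l = l.flatten
  | [] => rfl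
  | [a] => by simp [List.intercalate]
  | a :: b :: t => by
      have ih := pvInterNil (b :: t)
      unfold List.intercalate at ih ⊢
      rw [show List.intersperse ([] : List α) (a :: b :: t) = a :: [] :: List.intersperse [] (b :: t) from rfl]
      simp [ih]

theorem pvJoin0_nil : PySem.Str.join "" [] = "" := by decide

theorem pvJoin0_cons (x : String) (l : List String) : PySem.Str.join "" (x :: l) = x ++ PySem.Str.join "" l := by
  simp [PySem.Str.join, PySem.Chars.join, pvInterNil, String.ofList_append, String.ofList_toList]

theorem pvJoin0_append (l m : List String) : PySem.Str.join "" (l ++ m) = PySem.Str.join "" l ++ PySem.Str.join "" m := by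
  induction l with
  | nil => simp [pvJoin0_nil, String.empty_append]
  | cons x t ih => simp only [List.cons_append, pvJoin0_cons, ih, String.append_assoc]

theorem pvBeqSingle (a c : Char) : (String.ofList [a] == String.ofList [c]) = (a == c) := by
  rcases eq_or_ne a c with h | h
  · subst h; simp
  · have h' : String.ofList [a] ≠ String.ofList [c] := by simpa [String.ofList_inj] using h
    simp [h, h']

-- the outer template table, branch by branch on the order's length
theorem pvOuterGet (n : Int) : pvTemplates.get? n =
    if n = 11 then some (PySem.Dict.mk [("", [[PvTok.lit " (XDO ((", PvTok.fld "p", PvTok.lit " ", PvTok.fld "a0", PvTok.lit " ", PvTok.fld "s25", PvTok.lit ") MTO ", PvTok.fld "s811", PvTok.lit "))"]])])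
    else if n = 7 then some (PySem.Dict.mk [("H", [[PvTok.lit " (XDO ((", PvTok.fld "p", PvTok.lit " ", PvTok.fld "a0", PvTok.lit " ", PvTok.fld "s25", PvTok.lit ") HLD))"]]),
                      ("B", [[PvTok.lit " (XDO ((", PvTok.fld "p", PvTok.lit " ", PvTok.fld "a0", PvTok.lit " ", PvTok.fld "s25", PvTok.lit ") BLD))"]]),
                      ("R", [[PvTok.lit " (XDO ((", PvTok.fld "p", PvTok.lit " ", PvTok.fld "a0", PvTok.lit " ", PvTok.fld "s25", PvTok.lit ") REM))"]])])
    else if n = 19 then some (PySem.Dict.mk [("S", [[PvTok.lit " (XDO ((", PvTok.fld "p", PvTok.lit " ", PvTok.fld "a0", PvTok.lit " ", PvTok.fld "s25", PvTok.lit ") SUP (", PvTok.fld "p", PvTok.lit " ", PvTok.fld "a8", PvTok.lit " ", PvTok.fld "s1013", PvTok.lit ") MTO ", PvTok.fld "s1619", PvTok.lit "))"]]),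
                       ("C", [[PvTok.lit " (XDO ((", PvTok.fld "p", PvTok.lit " ", PvTok.fld "a0", PvTok.lit " ", PvTok.fld "s25", PvTok.lit ") CVY (", PvTok.fld "p", PvTok.lit " ", PvTok.fld "a8", PvTok.lit " ", PvTok.fld "s1013", PvTok.lit ") CTO ", PvTok.fld "s1619", PvTok.lit "))"],
                              [PvTok.lit " (XDO ((", PvTok.fld "p", PvTok.lit " ", PvTok.fld "a8", PvTok.lit " ", PvTok.fld "s1013", PvTok.lit ") CTO ", PvTok.fld "s1619", PvTok.lit " VIA (", PvTok.fld "s25", PvTok.lit ")))"]])])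
    else none := by
  simp only [pvTemplates, PySem.Dict.get?_mk_cons, beq_iff_eq]
  split_ifs <;> first | rfl | omega

-- the length-7 inner table against a possibly-absent 7th character
theorem pvInner7 (c? : Option Char) :
    (PySem.Dict.mk [("H", [[PvTok.lit " (XDO ((", PvTok.fld "p", PvTok.lit " ", PvTok.fld "a0", PvTok.lit " ", PvTok.fld "s25", PvTok.lit ") HLD))"]]),
                    ("B", [[PvTok.lit " (XDO ((", PvTok.fld "p", PvTok.lit " ", PvTok.fld "a0", PvTok.lit " ", PvTok.fld "s25", PvTok.lit ") BLD))"]]),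
                    ("R", [[PvTok.lit " (XDO ((", PvTok.fld "p", PvTok.lit " ", PvTok.fld "a0", PvTok.lit " ", PvTok.fld "s25", PvTok.lit ") REM))"]])]).get?
      (match c? with | some c => String.ofList [c] | none => "") =
    if c? = some 'H' then some [[PvTok.lit " (XDO ((", PvTok.fld "p", PvTok.lit " ", PvTok.fld "a0", PvTok.lit " ", PvTok.fld "s25", PvTok.lit ") HLD))"]]
    else if c? = some 'B' then some [[PvTok.lit " (XDO ((", PvTok.fld "p", PvTok.lit " ", PvTok.fld "a0", PvTok.lit " ", PvTok.fld "s25", PvTok.lit ") BLD))"]]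
    else if c? = some 'R' then some [[PvTok.lit " (XDO ((", PvTok.fld "p", PvTok.lit " ", PvTok.fld "a0", PvTok.lit " ", PvTok.fld "s25", PvTok.lit ") REM))"]]
    else none := by
  cases c? with
  | none => decide
  | some c =>
    simp only [PySem.Dict.get?_mk_cons]
    rw [show ("H" : String) = String.ofList ['H'] by decide,
        show ("B" : String) = String.ofList ['B'] by decide,
        show ("R" : String) = String.ofList ['R'] by decide]
    rw [pvBeqSingle, pvBeqSingle, pvBeqSingle]
    simp only [Option.some.injEq, beq_iff_eq]
    split_ifs <;> first | rfl | (subst_vars; simp_all)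

-- the length-19 inner table against a possibly-absent 7th character
theorem pvInner19 (c? : Option Char) :
    (PySem.Dict.mk [("S", [[PvTok.lit " (XDO ((", PvTok.fld "p", PvTok.lit " ", PvTok.fld "a0", PvTok.lit " ", PvTok.fld "s25", PvTok.lit ") SUP (", PvTok.fld "p", PvTok.lit " ", PvTok.fld "a8", PvTok.lit " ", PvTok.fld "s1013", PvTok.lit ") MTO ", PvTok.fld "s1619", PvTok.lit "))"]]),
                    ("C", [[PvTok.lit " (XDO ((", PvTok.fld "p", PvTok.lit " ", PvTok.fld "a0", PvTok.lit " ", PvTok.fld "s25", PvTok.lit ") CVY (", PvTok.fld "p", PvTok.lit " ", PvTok.fld "a8", PvTok.lit " ", PvTok.fld "s1013", PvTok.lit ") CTO ", PvTok.fld "s1619", PvTok.lit "))"],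
                           [PvTok.lit " (XDO ((", PvTok.fld "p", PvTok.lit " ", PvTok.fld "a8", PvTok.lit " ", PvTok.fld "s1013", PvTok.lit ") CTO ", PvTok.fld "s1619", PvTok.lit " VIA (", PvTok.fld "s25", PvTok.lit ")))"]])]).get?
      (match c? with | some c => String.ofList [c] | none => "") =
    if c? = some 'S' then some [[PvTok.lit " (XDO ((", PvTok.fld "p", PvTok.lit " ", PvTok.fld "a0", PvTok.lit " ", PvTok.fld "s25", PvTok.lit ") SUP (", PvTok.fld "p", PvTok.lit " ", PvTok.fld "a8", PvTok.lit " ", PvTok.fld "s1013", PvTok.lit ") MTO ", PvTok.fld "s1619", PvTok.lit "))"]]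
    else if c? = some 'C' then some [[PvTok.lit " (XDO ((", PvTok.fld "p", PvTok.lit " ", PvTok.fld "a0", PvTok.lit " ", PvTok.fld "s25", PvTok.lit ") CVY (", PvTok.fld "p", PvTok.lit " ", PvTok.fld "a8", PvTok.lit " ", PvTok.fld "s1013", PvTok.lit ") CTO ", PvTok.fld "s1619", PvTok.lit "))"],
                                     [PvTok.lit " (XDO ((", PvTok.fld "p", PvTok.lit " ", PvTok.fld "a8", PvTok.lit " ", PvTok.fld "s1013", PvTok.lit ") CTO ", PvTok.fld "s1619", PvTok.lit " VIA (", PvTok.fld "s25", PvTok.lit ")))"]]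
    else none := by
  cases c? with
  | none => decide
  | some c =>
    simp only [PySem.Dict.get?_mk_cons]
    rw [show ("S" : String) = String.ofList ['S'] by decide,
        show ("C" : String) = String.ofList ['C'] by decide]
    rw [pvBeqSingle, pvBeqSingle]
    simp only [Option.some.injEq, beq_iff_eq]
    split_ifs <;> first | rfl | (subst_vars; simp_all)

-- splitting the fused literal A produces when the two convoy fragments are concatenated
theorem pvLitSplit (x : String) : (")) (XDO ((" : String) ++ x = "))" ++ (" (XDO ((" ++ x) := by
  rw [← String.append_assoc, show (("))" ++ " (XDO ((" : String)) = ")) (XDO ((" by decide]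

-- the fields dict once the order's length is known to be 19
theorem pvFields19 (pd ad : List (String × String)) (c i : String) (h : PySem.Str.len i = 19) :
    pvFields pd ad c i = PySem.Dict.mk
      [("p", pvGetStr pd c), ("a0", pvGetStr ad (pvCharStr i 0)),
       ("s25", PySem.Str.slice i (some 2) (some 5)), ("s811", PySem.Str.slice i (some 8) (some 11)),
       ("s1013", PySem.Str.slice i (some 10) (some 13)), ("s1619", PySem.Str.slice i (some 16) (some 19)),
       ("a8", pvGetStr ad (pvCharStr i 8))] := by
  unfold pvFields
  rw [if_pos h]

-- one order: A's state step appends exactly B's fragments and raises the flag iff they are nonempty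
set_option maxHeartbeats 1000000 in
theorem pvStep_eq (pd ad : List (String × String)) (c i : String) (sb : String × Bool) :
    pvStepA pd ad c i sb = (sb.1 ++ PySem.Str.join "" (pvFragsP pd ad c i), sb.2 || !(pvFragsP pd ad c i).isEmpty) := by
  simp only [pvStepA, pvFragsP]
  rw [pvOuterGet, show pvCharStr i 6 = (match PySem.Str.pyGet? i 6 with | some c => String.ofList [c] | none => "") from rfl]
  by_cases h11 : PySem.Str.len i = 11
  · simp only [h11]
    simp [PySem.Dict.get?_mk_cons, pvRender, pvFields, pvJoin0_cons, pvJoin0_nil, String.append_assoc]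
  · by_cases h7 : PySem.Str.len i = 7
    · simp only [h7]
      norm_num
      rw [pvInner7]
      split_ifs <;>
        simp [pvRender, pvFields, PySem.Dict.get?_mk_cons, pvJoin0_cons, pvJoin0_nil, String.append_assoc]
    · by_cases h19 : PySem.Str.len i = 19
      · simp only [h19]
        norm_num
        rw [pvInner19]
        rw [pvFields19 pd ad c i h19]
        split_ifs <;>
          simp [pvRender, PySem.Dict.get?_mk_cons, pvJoin0_cons, pvJoin0_nil, String.append_assoc, pvLitSplit]
      · rw [if_neg h11, if_neg h7, if_neg h19, if_neg h11, if_neg h7, if_neg h19]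
        simp [pvJoin0_nil, PySem.Dict.get?]

-- render_all is the flatMap of the per-pair fragment function
theorem pvRenderAll_eq (pd ad : List (String × String)) :
    ∀ (pairs : List (String × String)) (out : List String),
    pairs.foldl
      (fun out ci =>
        let n := PySem.Str.len ci.2
        match ((pvTemplates.get? n).getD (PySem.Dict.mk [])).get?
                (if n = 7 ∨ n = 19 then pvCharStr ci.2 6 else "") with
        | none => out
        | some tmpls => out ++ tmpls.map (pvRender (pvFields pd ad ci.1 ci.2))) out =
    out ++ pairs.flatMap (fun ci => pvFragsP pd ad ci.1 ci.2) := by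
  intro pairs
  induction pairs with
  | nil => intro out; simp
  | cons ci rest ih =>
    intro out
    rw [List.foldl_cons, ih, List.flatMap_cons]
    have hstep : (let n := PySem.Str.len ci.2
        match ((pvTemplates.get? n).getD (PySem.Dict.mk [])).get?
                (if n = 7 ∨ n = 19 then pvCharStr ci.2 6 else "") with
        | none => out
        | some tmpls => out ++ tmpls.map (pvRender (pvFields pd ad ci.1 ci.2)))
        = out ++ pvFragsP pd ad ci.1 ci.2 := by
      simp only [pvFragsP]
      cases ((pvTemplates.get? (PySem.Str.len ci.2)).getD (PySem.Dict.mk [])).get?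
                (if PySem.Str.len ci.2 = 7 ∨ PySem.Str.len ci.2 = 19 then pvCharStr ci.2 6 else "") <;>
        simp
    rw [hstep, List.append_assoc]

theorem pvLoop_eq (pd ad : List (String × String)) (c : String) :
    ∀ (orders : List String) (s : String) (b : Bool) (l : List String),
    orders.foldl (fun sb i => pvStepA pd ad c i sb) (s ++ PySem.Str.join "" l, b || !l.isEmpty) =
    (s ++ PySem.Str.join "" (l ++ orders.flatMap (fun i => pvFragsP pd ad c i)),
     b || !(l ++ orders.flatMap (fun i => pvFragsP pd ad c i)).isEmpty) := by
  intro orders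
  induction orders with
  | nil => intro s b l; simp
  | cons i0 rest ih =>
    intro s b l
    simp only [List.foldl_cons, List.flatMap_cons]
    rw [pvStep_eq]
    have h1 : (s ++ PySem.Str.join "" l) ++ PySem.Str.join "" (pvFragsP pd ad c i0)
        = s ++ PySem.Str.join "" (l ++ pvFragsP pd ad c i0) := by
      rw [pvJoin0_append, String.append_assoc]
    have h2 : ((b || !l.isEmpty) || !(pvFragsP pd ad c i0).isEmpty)
        = (b || !(l ++ pvFragsP pd ad c i0).isEmpty) := by
      cases l <;> cases b <;> simp
    rw [h1, h2, ih s b (l ++ pvFragsP pd ad c i0)]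
    simp [List.append_assoc]

-- the whole pass of A, against the two partitioned fragment lists of B
theorem pvOuterInv (pd ad : List (String × String)) (sender : String) :
    ∀ (l : List (String × List String)) (f p : List String) (s1 s2 : String),
    l.foldl
      (fun (st : (String × Bool) × (String × Bool)) kv =>
        if kv.1 = sender then
          (kv.2.foldl (fun sb i => pvStepA pd ad kv.1 i sb) st.1, st.2)
        else
          (st.1, kv.2.foldl (fun sb i => pvStepA pd ad kv.1 i sb) st.2))
      ((s1 ++ PySem.Str.join "" f, !f.isEmpty), (s2 ++ PySem.Str.join "" p, !p.isEmpty)) =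
    ((s1 ++ PySem.Str.join "" (f ++ l.flatMap (fun kv => if kv.1 = sender then kv.2.flatMap (fun i => pvFragsP pd ad kv.1 i) else [])),
      !(f ++ l.flatMap (fun kv => if kv.1 = sender then kv.2.flatMap (fun i => pvFragsP pd ad kv.1 i) else [])).isEmpty),
     (s2 ++ PySem.Str.join "" (p ++ l.flatMap (fun kv => if kv.1 = sender then [] else kv.2.flatMap (fun i => pvFragsP pd ad kv.1 i))),
      !(p ++ l.flatMap (fun kv => if kv.1 = sender then [] else kv.2.flatMap (fun i => pvFragsP pd ad kv.1 i))).isEmpty)) := by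
  intro l
  induction l with
  | nil => intro f p s1 s2; simp
  | cons kv rest ih =>
    intro f p s1 s2
    simp only [List.foldl_cons, List.flatMap_cons]
    by_cases h : kv.1 = sender
    · have hl := pvLoop_eq pd ad kv.1 kv.2 s1 false f
      simp only [Bool.false_or] at hl
      simp only [if_pos h, hl]
      rw [ih (f ++ kv.2.flatMap (fun i => pvFragsP pd ad kv.1 i)) p s1 s2]
      simp [h, List.append_assoc]
    · have hl := pvLoop_eq pd ad kv.1 kv.2 s2 false p
      simp only [Bool.false_or] at hl
      simp only [if_neg h, hl]
      rw [ih f (p ++ kv.2.flatMap (fun i => pvFragsP pd ad kv.1 i)) s1 s2]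
      simp [List.append_assoc]

-- pointwise-equal functions give equal flatMaps
theorem pvFlatMapCongr {α β : Type} (l : List α) (f g : α → List β) (h : ∀ x, f x = g x) :
    l.flatMap f = l.flatMap g := by
  have : f = g := funext h
  rw [this]

-- ===== VERDICT (by name: the statement is the Claim_ definition above) =====
theorem psudo_code_gene_spec : Claim_equal_psudo_code_gene := by
  intro cpc msg pd ad hdom hpre
  obtain ⟨hs, hnd, hlk⟩ := hpre
  unfold Spec_psudo_code_gene
  by_cases hcpc : cpc = []
  · subst hcpc
    simp [psudo_code_gene, psudo_code_gene_alt, pvRenderAll]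
  · have hsome : ((PySem.Dict.mk msg).get? "sender").isSome = true := by
      rcases hs with h | h
      · exact absurd h hcpc
      · exact h
    obtain ⟨s, hsv⟩ := Option.isSome_iff_exists.mp hsome
    dsimp only [psudo_code_gene, psudo_code_gene_alt]
    simp only [hsv, Option.getD_some]
    have hcongr : cpc.foldl
        (fun (st : (String × Bool) × (String × Bool)) kv =>
          let orders := ((PySem.Dict.mk cpc).get? kv.1).getD []
          if kv.1 = s then
            (orders.foldl (fun sb i => pvStepA pd ad kv.1 i sb) st.1, st.2)
          else
            (st.1, orders.foldl (fun sb i => pvStepA pd ad kv.1 i sb) st.2))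
        (("FCT (ORR", false), ("PRP (ORR", false)) =
      cpc.foldl
        (fun (st : (String × Bool) × (String × Bool)) kv =>
          if kv.1 = s then
            (kv.2.foldl (fun sb i => pvStepA pd ad kv.1 i sb) st.1, st.2)
          else
            (st.1, kv.2.foldl (fun sb i => pvStepA pd ad kv.1 i sb) st.2))
        (("FCT (ORR", false), ("PRP (ORR", false)) := by
      apply PySem.List.foldl_congr_mem
      intro acc kv hkv
      have hget : (PySem.Dict.mk cpc).get? kv.1 = some kv.2 := by
        apply PySem.Dict.get?_of_mem_items
        · exact hkv
        · simpa [PySem.Dict.keys_mk] using hnd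
      simp [hget]
    rw [hcongr]
    rw [show (("FCT (ORR" : String), false) = ("FCT (ORR" ++ PySem.Str.join "" ([] : List String), !([] : List String).isEmpty) by
          rw [pvJoin0_nil]; simp [String.append_empty],
        show (("PRP (ORR" : String), false) = ("PRP (ORR" ++ PySem.Str.join "" ([] : List String), !([] : List String).isEmpty) by
          rw [pvJoin0_nil]; simp [String.append_empty]]
    rw [pvOuterInv pd ad s cpc [] [] "FCT (ORR" "PRP (ORR"]
    have hfct : pvRenderAll pd ad (cpc.flatMap fun kv => if some kv.1 = some s then kv.2.map (fun o => (kv.1, o)) else [])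
        = cpc.flatMap (fun kv => if kv.1 = s then kv.2.flatMap (fun i => pvFragsP pd ad kv.1 i) else []) := by
      rw [show pvRenderAll pd ad (cpc.flatMap fun kv => if some kv.1 = some s then kv.2.map (fun o => (kv.1, o)) else [])
            = [] ++ (cpc.flatMap fun kv => if some kv.1 = some s then kv.2.map (fun o => (kv.1, o)) else []).flatMap
                (fun ci => pvFragsP pd ad ci.1 ci.2) from pvRenderAll_eq pd ad _ []]
      rw [List.nil_append, List.flatMap_assoc]
      exact pvFlatMapCongr _ _ _ (fun kv => by by_cases h : kv.1 = s <;> simp [h, List.flatMap_map])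
    have hprp : pvRenderAll pd ad (cpc.flatMap fun kv => if some kv.1 = some s then [] else kv.2.map (fun o => (kv.1, o)))
        = cpc.flatMap (fun kv => if kv.1 = s then [] else kv.2.flatMap (fun i => pvFragsP pd ad kv.1 i)) := by
      rw [show pvRenderAll pd ad (cpc.flatMap fun kv => if some kv.1 = some s then [] else kv.2.map (fun o => (kv.1, o)))
            = [] ++ (cpc.flatMap fun kv => if some kv.1 = some s then [] else kv.2.map (fun o => (kv.1, o))).flatMap
                (fun ci => pvFragsP pd ad ci.1 ci.2) from pvRenderAll_eq pd ad _ []]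
      rw [List.nil_append, List.flatMap_assoc]
      exact pvFlatMapCongr _ _ _ (fun kv => by by_cases h : kv.1 = s <;> simp [h, List.flatMap_map])
    rw [hfct, hprp]
    cases h1 : (cpc.flatMap (fun kv => if kv.1 = s then kv.2.flatMap (fun i => pvFragsP pd ad kv.1 i) else [])).isEmpty <;>
    cases h2 : (cpc.flatMap (fun kv => if kv.1 = s then [] else kv.2.flatMap (fun i => pvFragsP pd ad kv.1 i))).isEmpty <;>
      simp [h1, h2, String.append_assoc]
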